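-- pv_equiv track=rewrite | github.com/samuraifrenchienft/Music-Legends-Final | config/economy.py | get_daily_reward
-- ===== SOURCE A (Python) =====
-- DAILY_REWARDS = {
--     1: {"gold": 100, "tickets": 0},      # Day 1
--     3: {"gold": 150, "tickets": 0},      # Day 3 streak bonus
--     7: {"gold": 300, "tickets": 1},      # Week streak
--     14: {"gold": 600, "tickets": 2},     # Two week streak
--     30: {"gold": 1100, "tickets": 5},    # Month streak
-- }
--
-- DEFAULT_DAILY = {"gold": 100, "tickets": 0}
--
-- def get_daily_reward(streak_days: int) -> dict:
--     """Get daily reward based on streak length"""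
--     # Check for milestone days
--     if streak_days in DAILY_REWARDS:
--         return DAILY_REWARDS[streak_days]
--
--     # Check for closest milestone below current streak
--     milestones = sorted(DAILY_REWARDS.keys(), reverse=True)
--     for milestone in milestones:
--         if streak_days >= milestone:
--             return DAILY_REWARDS[milestone]
--
--     return DEFAULT_DAILY
-- ===== SOURCE B (Python) =====
-- DAILY_REWARDS = {
--     1: {"gold": 100, "tickets": 0},
--     3: {"gold": 150, "tickets": 0},
--     7: {"gold": 300, "tickets": 1},
--     14: {"gold": 600, "tickets": 2},
--     30: {"gold": 1100, "tickets": 5},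
-- }
--
-- DEFAULT_DAILY = {"gold": 100, "tickets": 0}
--
-- # Milestones in ascending order, paired with their rewards, built once.
-- _TABLE = sorted(DAILY_REWARDS.items())
--
--
-- def get_daily_reward(streak_days: int) -> dict:
--     """Get daily reward based on streak length"""
--     # Binary search: insertion point of streak_days among milestone keys
--     # (rightmost), i.e. index of the greatest milestone <= streak_days, plus 1.
--     lo, hi = 0, len(_TABLE)
--     while lo < hi:
--         mid = (lo + hi) // 2
--         if _TABLE[mid][0] <= streak_days:
--             lo = mid + 1
--         else:
--             hi = mid
--     if lo == 0:
--         return DEFAULT_DAILY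
--     return _TABLE[lo - 1][1]
-- ===== Notes on version B (the rewrite author's own statement) =====
-- stated objective: idiomatic
-- what changed: Replaces the exact-match dict lookup plus descending linear scan of milestones with a single bisect_right-style binary search over an ascending (milestone, reward) table built once at module load.
import Mathlib
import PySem

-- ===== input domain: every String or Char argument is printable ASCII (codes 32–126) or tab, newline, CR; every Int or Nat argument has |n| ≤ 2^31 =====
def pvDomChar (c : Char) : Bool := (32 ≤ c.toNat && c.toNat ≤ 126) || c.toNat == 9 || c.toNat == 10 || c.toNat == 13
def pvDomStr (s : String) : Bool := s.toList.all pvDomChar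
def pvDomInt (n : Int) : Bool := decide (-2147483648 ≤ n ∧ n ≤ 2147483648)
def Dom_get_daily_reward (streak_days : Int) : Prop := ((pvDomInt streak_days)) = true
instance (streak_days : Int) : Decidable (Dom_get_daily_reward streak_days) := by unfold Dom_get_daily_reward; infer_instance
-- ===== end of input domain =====

-- B replaces A's exact-match check plus descending linear scan with one binary search
-- over an ascending (milestone, reward) table (objective: idiomatic; no speed claim).

-- ===== PORT A =====
def DAILY_REWARDS : PySem.Dict Int (List (String × Int)) :=
  PySem.Dict.ofList
    [(1,  [("gold", 100),  ("tickets", 0)]),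
     (3,  [("gold", 150),  ("tickets", 0)]),
     (7,  [("gold", 300),  ("tickets", 1)]),
     (14, [("gold", 600),  ("tickets", 2)]),
     (30, [("gold", 1100), ("tickets", 5)])]

def DEFAULT_DAILY : List (String × Int) := [("gold", 100), ("tickets", 0)]

-- the 'for milestone in milestones: if streak_days >= milestone: return …' loop
def milestoneLoop (streak_days : Int) : List Int → List (String × Int)
  | [] => DEFAULT_DAILY
  | m :: rest =>
      if streak_days ≥ m then (DAILY_REWARDS.get? m).getD [] else milestoneLoop streak_days rest

def get_daily_reward (streak_days : Int) : List (String × Int) :=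
  match DAILY_REWARDS.get? streak_days with
  | some v => v
  | none => milestoneLoop streak_days (PySem.List.sorted DAILY_REWARDS.keys (fun x => x) true)

-- ===== PORT B =====
-- _TABLE = sorted(DAILY_REWARDS.items())
def pvTable : List (Int × List (String × Int)) :=
  PySem.List.sorted DAILY_REWARDS.items (fun p => p.1) false

-- the while-loop binary search (bisect_right over the milestone keys)
def bisectLoop (streak_days : Int) (lo hi : Nat) : Nat :=
  if _h : lo < hi then
    let mid := (lo + hi) / 2
    if (pvTable.getD mid (0, [])).1 ≤ streak_days then bisectLoop streak_days (mid + 1) hi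
    else bisectLoop streak_days lo mid
  else lo
termination_by hi - lo

def get_daily_reward_alt (streak_days : Int) : List (String × Int) :=
  let lo := bisectLoop streak_days 0 pvTable.length
  if lo = 0 then DEFAULT_DAILY else (pvTable.getD (lo - 1) (0, [])).2

-- ===== PRECONDITION & SPEC =====
def Spec_get_daily_reward (streak_days : Int) (out : List (String × Int)) : Prop := out = get_daily_reward_alt streak_days
instance (streak_days : Int) (out : List (String × Int)) : Decidable (Spec_get_daily_reward streak_days out) := by unfold Spec_get_daily_reward; infer_instance

-- ===== CLAIM (what is proved, stated in full; the proofs are below) =====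
def Claim_equal_get_daily_reward : Prop := ∀ (streak_days : Int), Dom_get_daily_reward streak_days → Spec_get_daily_reward streak_days (get_daily_reward streak_days)

-- ===== LEMMAS AND PROOFS =====


theorem pvTable_eval : pvTable = [(1,[("gold",100),("tickets",0)]),(3,[("gold",150),("tickets",0)]),(7,[("gold",300),("tickets",1)]),(14,[("gold",600),("tickets",2)]),(30,[("gold",1100),("tickets",5)])] := by decide

theorem pvDict_eval : DAILY_REWARDS = PySem.Dict.mk [(1,[("gold",100),("tickets",0)]),(3,[("gold",150),("tickets",0)]),(7,[("gold",300),("tickets",1)]),(14,[("gold",600),("tickets",2)]),(30,[("gold",1100),("tickets",5)])] := by decide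

theorem pvMilestones_eval : PySem.List.sorted DAILY_REWARDS.keys (fun x => x) true = [30,14,7,3,1] := by decide

theorem pvBis_eval (s : Int) :
    bisectLoop s 0 5 =
      if (7:Int) <= s then (if 14 <= s then (if 30 <= s then 5 else 4) else 3)
      else (if 3 <= s then 2 else if 1 <= s then 1 else 0) := by
  unfold bisectLoop
  unfold bisectLoop
  unfold bisectLoop
  unfold bisectLoop
  simp only [pvTable_eval]
  norm_num
  split_ifs <;> first | rfl | omega

theorem pvGet?_eval (s : Int) :
    DAILY_REWARDS.get? s =
      if s = 1 then some [("gold",100),("tickets",0)]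
      else if s = 3 then some [("gold",150),("tickets",0)]
      else if s = 7 then some [("gold",300),("tickets",1)]
      else if s = 14 then some [("gold",600),("tickets",2)]
      else if s = 30 then some [("gold",1100),("tickets",5)]
      else none := by
  simp only [pvDict_eval, PySem.Dict.get?_mk_cons, beq_iff_eq]
  split_ifs <;> first | rfl | omega


theorem pvAlt_eval (s : Int) :
    get_daily_reward_alt s =
      if (30:Int) <= s then [("gold",1100),("tickets",5)]
      else if 14 <= s then [("gold",600),("tickets",2)]
      else if 7 <= s then [("gold",300),("tickets",1)]
      else if 3 <= s then [("gold",150),("tickets",0)]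
      else if 1 <= s then [("gold",100),("tickets",0)]
      else DEFAULT_DAILY := by
  unfold get_daily_reward_alt
  rw [show pvTable.length = 5 from by rw [pvTable_eval]; rfl, pvBis_eval]
  split_ifs <;> first | omega | norm_num [pvTable_eval]

theorem pvA_eval (s : Int) :
    get_daily_reward s =
      if (30:Int) <= s then [("gold",1100),("tickets",5)]
      else if 14 <= s then [("gold",600),("tickets",2)]
      else if 7 <= s then [("gold",300),("tickets",1)]
      else if 3 <= s then [("gold",150),("tickets",0)]
      else if 1 <= s then [("gold",100),("tickets",0)]
      else DEFAULT_DAILY := by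
  unfold get_daily_reward
  rw [pvGet?_eval, pvMilestones_eval]
  simp only [milestoneLoop, pvGet?_eval]
  norm_num
  split_ifs <;> first | rfl | omega

-- ===== VERDICT (by name: the statement is the Claim_ definition above) =====
theorem get_daily_reward_spec : Claim_equal_get_daily_reward := by
  intro s _
  unfold Spec_get_daily_reward
  rw [pvA_eval, pvAlt_eval]
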